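-- pv_equiv track=rewrite | github.com/my-alaska/APTO-ACHP | lab4/sat_utility.py | simplifyClause
-- ===== SOURCE A (Python) =====
-- def simplifyClause(clause, V):
--     """helper function to simplify clause
--     remove all false variables or return None if clause is positive"""
--     res = []
--     for v in clause:
--         if v not in V:
--             # variables that don't have assigned values yet
--             res.append(v)
--         elif V[v] == 1:
--             # one positive makes the whole value of the clause True
--             return None
--     return res
-- ===== SOURCE B (Python) =====
-- def simplifyClause(clause, V):
--     """Two separate passes: short-circuit satisfiability check, then collect unassigned literals."""
--     if any(V.get(v) == 1 for v in clause):
--         return None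
--     return [v for v in clause if v not in V]
-- ===== Notes on version B (the rewrite author's own statement) =====
-- stated objective: idiomatic
-- what changed: Replaces the single interleaved loop (accumulator + early return) by two separate passes: a short-circuiting any() satisfiability check followed by a list comprehension collecting unassigned literals.
import Mathlib
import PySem

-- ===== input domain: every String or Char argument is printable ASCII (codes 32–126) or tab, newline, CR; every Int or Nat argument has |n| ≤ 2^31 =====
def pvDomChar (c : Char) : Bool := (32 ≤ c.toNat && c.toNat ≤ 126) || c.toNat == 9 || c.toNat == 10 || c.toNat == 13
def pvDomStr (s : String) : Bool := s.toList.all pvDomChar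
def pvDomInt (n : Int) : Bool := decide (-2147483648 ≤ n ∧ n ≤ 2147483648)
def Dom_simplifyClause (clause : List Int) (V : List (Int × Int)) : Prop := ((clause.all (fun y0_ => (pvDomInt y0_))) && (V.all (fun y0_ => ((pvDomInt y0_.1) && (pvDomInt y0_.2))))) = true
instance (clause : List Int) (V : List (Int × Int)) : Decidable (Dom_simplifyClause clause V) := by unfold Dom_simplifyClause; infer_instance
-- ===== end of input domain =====

-- B replaces A's single interleaved loop by two separate passes (any-check, then filter); objective: idiomatic, same cost.

-- ===== PORT A =====
-- loop of A: accumulator `res`, early `return None` on a true literal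
def simplifyClauseLoop (V : List (Int × Int)) : List Int → List Int → Option (List Int)
  | [], res => some res
  | v :: rest, res =>
    match (PySem.Dict.mk V).get? v with
    | none => simplifyClauseLoop V rest (res ++ [v])
    | some x => if x == 1 then none else simplifyClauseLoop V rest res

def simplifyClause (clause : List Int) (V : List (Int × Int)) : Option (List Int) :=
  simplifyClauseLoop V clause []

-- ===== PORT B =====
-- B: two passes — short-circuit satisfiability check, then collect unassigned literals
def simplifyClause_alt (clause : List Int) (V : List (Int × Int)) : Option (List Int) :=
  if clause.any (fun v => (PySem.Dict.mk V).get? v == some 1) then none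
  else some (clause.filter (fun v => (PySem.Dict.mk V).get? v == none))

-- ===== PRECONDITION & SPEC =====
def Spec_simplifyClause (clause : List Int) (V : List (Int × Int)) (out : Option (List Int)) : Prop := out = simplifyClause_alt clause V
instance (clause : List Int) (V : List (Int × Int)) (out : Option (List Int)) : Decidable (Spec_simplifyClause clause V out) := by unfold Spec_simplifyClause; infer_instance

-- ===== CLAIM (what is proved, stated in full; the proofs are below) =====
def Claim_equal_simplifyClause : Prop := ∀ (clause : List Int) (V : List (Int × Int)), Dom_simplifyClause clause V → Spec_simplifyClause clause V (simplifyClause clause V)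

-- ===== LEMMAS AND PROOFS =====

-- ===== VERDICT (by name: the statement is the Claim_ definition above) =====
theorem simplifyClauseLoop_eq (V : List (Int × Int)) (clause res : List Int) :
    simplifyClauseLoop V clause res =
      if clause.any (fun v => (PySem.Dict.mk V).get? v == some 1) then none
      else some (res ++ clause.filter (fun v => (PySem.Dict.mk V).get? v == none)) := by
  induction clause generalizing res with
  | nil => simp [simplifyClauseLoop]
  | cons v rest ih =>
    simp only [simplifyClauseLoop, List.any_cons, List.filter_cons]
    cases h : (PySem.Dict.mk V).get? v with
    | none => simp [ih]
    | some x =>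
      by_cases hx : x = 1
      · simp [hx]
      · simp [hx, ih]

theorem simplifyClause_spec : Claim_equal_simplifyClause := by
  intro clause V _
  unfold Spec_simplifyClause simplifyClause simplifyClause_alt
  simp [simplifyClauseLoop_eq]
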